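-- pv_equiv track=rewrite | github.com/chenlin014/xingyi | jianma/jianma-gen.py | gen_jianma
-- ===== SOURCE A (Python) =====
-- def gen_jianma(mb, methods, char_freq=dict()):
--     used_texts = set()
--     used_codes = set(mb.values())
--
--     tables = list()
--     for method in methods:
--         table = dict()
--         reverse_table = dict()
--         for text, code in mb.items():
--             ncode = ''.join(code[ind] for ind in method) if len(code) > len(method) else code
--             if text in used_texts or ncode in used_codes:
--                 continue
--             if ncode in table:
--                 if char_freq.get(text, 0) > char_freq.get(table[ncode], 0):
--                     table[ncode] = text
--             else:
--                 table[ncode] = text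
--
--         used_texts = used_texts | set(table.values())
--         used_codes = used_codes | set(table)
--
--         tables.append(table)
--
--     return tables
-- ===== SOURCE B (Python) =====
-- def gen_jianma(mb, methods, char_freq=dict()):
--     items = list(mb.items())
--
--     def freq(t):
--         return char_freq.get(t, 0)
--
--     def shorten(code, method):
--         if len(code) > len(method):
--             return ''.join(code[i] for i in method)
--         return code
--
--     def best(texts):
--         # earliest text with the maximum frequency
--         b = texts[0]
--         for t in texts[1:]:
--             if freq(t) > freq(b):
--                 b = t
--         return b
--
--     def build(ms, used_texts, used_codes):
--         if not ms:
--             return []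
--         cands = [(shorten(code, ms[0]), text)
--                  for text, code in items if text not in used_texts]
--         cands = [(nc, t) for nc, t in cands if nc not in used_codes]
--         keys = []
--         for nc, _ in cands:
--             if nc not in keys:
--                 keys.append(nc)
--         pairs = [(nc, best([t for nc2, t in cands if nc2 == nc])) for nc in keys]
--         return [dict(pairs)] + build(ms[1:],
--                                      used_texts + [t for _, t in pairs],
--                                      used_codes + [nc for nc, _ in pairs])
--
--     return build(methods, [], [code for _, code in items])
-- ===== Notes on version B (the rewrite author's own statement) =====
-- stated objective: alternative
-- what changed: A scans mb once per method keeping a running best-so-far dict updated by in-place frequency comparisons; B recurses over methods and, per method, builds the eligible candidate list by comprehension, collects the distinct shortened codes in first-occurrence order, and picks each code's winner by an explicit max-by-frequency scan of its group, carrying used texts/codes as plain lists.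
import Mathlib
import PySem

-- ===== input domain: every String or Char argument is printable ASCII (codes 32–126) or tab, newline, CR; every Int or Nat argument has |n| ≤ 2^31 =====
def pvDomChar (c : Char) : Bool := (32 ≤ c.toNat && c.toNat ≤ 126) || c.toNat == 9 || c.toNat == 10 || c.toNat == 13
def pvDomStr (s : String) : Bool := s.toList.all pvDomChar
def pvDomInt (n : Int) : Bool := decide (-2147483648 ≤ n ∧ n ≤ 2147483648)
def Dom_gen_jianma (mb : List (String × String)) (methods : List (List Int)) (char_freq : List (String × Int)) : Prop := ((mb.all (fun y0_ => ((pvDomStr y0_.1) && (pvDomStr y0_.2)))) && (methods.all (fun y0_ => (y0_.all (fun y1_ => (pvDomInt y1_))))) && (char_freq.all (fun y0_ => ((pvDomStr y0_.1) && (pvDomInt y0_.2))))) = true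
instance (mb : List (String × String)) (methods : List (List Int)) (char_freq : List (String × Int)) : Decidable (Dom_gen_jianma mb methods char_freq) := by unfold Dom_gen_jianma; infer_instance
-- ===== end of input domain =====

-- B replaces A's per-method running best-so-far dict by an explicit recursion over
-- methods that builds the eligible candidate list, collects its distinct shortened
-- codes in first-occurrence order and picks each group's winner by a max-by-frequency
-- scan, carrying the used texts/codes as plain lists; objective: alternative.

-- char_freq.get(text, 0)  (the same Python expression occurs in A and B)
def pvFreq (char_freq : List (String × Int)) (t : String) : Int :=
  PySem.Dict.getD (PySem.Dict.mk char_freq) t 0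

-- ===== PORT A =====
-- ncode = ''.join(code[ind] for ind in method) if len(code) > len(method) else code
def pvNcode (code : String) (method : List Int) : String :=
  if method.length < code.toList.length then
    String.ofList (method.map (fun i => (PySem.List.pyGet? code.toList i).getD ' '))
  else code

-- body of A's inner 'for text, code in mb.items()' loop
def pvStepA (char_freq : List (String × Int)) (method : List Int)
    (ut uc : PySem.Set String)
    (table : PySem.Dict String String) (tc : String × String) : PySem.Dict String String :=
  let ncode := pvNcode tc.2 method
  if PySem.Set.contains ut tc.1 || PySem.Set.contains uc ncode then table
  else if table.contains ncode then
    (if pvFreq char_freq tc.1 > pvFreq char_freq (table.getD ncode "") then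
      table.insert ncode tc.1
    else table)
  else table.insert ncode tc.1

-- body of A's outer 'for method in methods' loop; state = (used_texts, used_codes, tables)
def pvMethodA (mb : List (String × String)) (char_freq : List (String × Int))
    (st : PySem.Set String × PySem.Set String × List (List (String × String)))
    (method : List Int) : PySem.Set String × PySem.Set String × List (List (String × String)) :=
  let table := mb.foldl (pvStepA char_freq method st.1 st.2.1) PySem.Dict.empty
  (PySem.Set.union st.1 table.values, PySem.Set.union st.2.1 table.keys, st.2.2 ++ [table.items])

def gen_jianma (mb : List (String × String)) (methods : List (List Int)) (char_freq : List (String × Int)) : List (List (String × String)) :=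
  (methods.foldl (pvMethodA mb char_freq)
    (PySem.Set.empty, PySem.Set.ofList (mb.map Prod.snd), [])).2.2

-- ===== PORT B =====
-- def shorten(code, method): return ''.join(code[i] for i in method) if len(code) > len(method) else code
def pvShorten (code : String) (method : List Int) : String :=
  if code.toList.length > method.length then
    String.ofList (method.map (fun i => (PySem.List.pyGet? code.toList i).getD ' '))
  else code

-- def best(texts): running max-by-frequency scan starting from texts[0]
-- (Source B calls it only on nonempty groups; headD's "" default is unreachable there)
def pvBest (cf : List (String × Int)) (texts : List String) : String :=
  texts.tail.foldl (fun b t => if pvFreq cf t > pvFreq cf b then t else b) (texts.headD "")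

-- the two candidate comprehensions of Source B
def pvCands (mb : List (String × String)) (method : List Int)
    (used_texts used_codes : List String) : List (String × String) :=
  ((mb.filter (fun p => !used_texts.contains p.1)).map
      (fun p => (pvShorten p.2 method, p.1))).filter
    (fun q => !used_codes.contains q.1)

-- def build(ms, used_texts, used_codes): recursion over the methods
def pvBuild (mb : List (String × String)) (cf : List (String × Int)) :
    List (List Int) → List String → List String → List (List (String × String))
  | [], _, _ => []
  | m :: ms, used_texts, used_codes =>
    let cands := pvCands mb m used_texts used_codes
    let keys := cands.foldl (fun ks q => if ks.contains q.1 then ks else ks ++ [q.1]) []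
    let pairs := keys.map (fun nc =>
      (nc, pvBest cf ((cands.filter (fun q => q.1 == nc)).map Prod.snd)))
    pairs :: pvBuild mb cf ms (used_texts ++ pairs.map Prod.snd) (used_codes ++ pairs.map Prod.fst)

def gen_jianma_alt (mb : List (String × String)) (methods : List (List Int)) (char_freq : List (String × Int)) : List (List (String × String)) :=
  pvBuild mb char_freq methods [] (mb.map Prod.snd)

-- ===== PRECONDITION & SPEC =====
-- Pre_ excludes exactly the inputs where A raises IndexError: some method index falls
-- outside some code string that is strictly longer than the method (Python evaluates the
-- join before the eligibility test, so every (method, code) pair must be in range).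
def Pre_gen_jianma (mb : List (String × String)) (methods : List (List Int)) (char_freq : List (String × Int)) : Prop :=
  ∀ method ∈ methods, ∀ p ∈ mb, method.length < p.2.toList.length →
    ∀ i ∈ method, PySem.Raise.InRange p.2.toList.length i
instance (mb : List (String × String)) (methods : List (List Int)) (char_freq : List (String × Int)) : Decidable (Pre_gen_jianma mb methods char_freq) := by unfold Pre_gen_jianma; infer_instance

def pvWitness_gen_jianma : (List (String × String)) × List (List Int) × (List (String × Int)) :=
  ([("ab", "xy"), ("c", "zw")], [[0], [1]], [("ab", 2)])

def Spec_gen_jianma (mb : List (String × String)) (methods : List (List Int)) (char_freq : List (String × Int)) (out : List (List (String × String))) : Prop := out = gen_jianma_alt mb methods char_freq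
instance (mb : List (String × String)) (methods : List (List Int)) (char_freq : List (String × Int)) (out : List (List (String × String))) : Decidable (Spec_gen_jianma mb methods char_freq out) := by unfold Spec_gen_jianma; infer_instance

-- ===== CLAIM (what is proved, stated in full; the proofs are below) =====
def Claim_equal_gen_jianma : Prop := ∀ (mb : List (String × String)) (methods : List (List Int)) (char_freq : List (String × Int)), Dom_gen_jianma mb methods char_freq → Pre_gen_jianma mb methods char_freq → Spec_gen_jianma mb methods char_freq (gen_jianma mb methods char_freq)

-- ===== LEMMAS AND PROOFS =====

-- eligibility test of A's inner loop, as one predicate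
def pvElig (method : List Int) (ut uc : PySem.Set String) (tc : String × String) : Bool :=
  !(PySem.Set.contains ut tc.1 || PySem.Set.contains uc (pvNcode tc.2 method))

-- A's inner-loop body with the guard stripped
def pvStepA' (cf : List (String × Int)) (method : List Int)
    (table : PySem.Dict String String) (tc : String × String) : PySem.Dict String String :=
  if table.contains (pvNcode tc.2 method) then
    (if pvFreq cf tc.1 > pvFreq cf (table.getD (pvNcode tc.2 method) "") then
      table.insert (pvNcode tc.2 method) tc.1
    else table)
  else table.insert (pvNcode tc.2 method) tc.1

-- A's inner-loop body on precomputed (ncode, text) pairs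
def pvStepA2 (cf : List (String × Int))
    (d : PySem.Dict String String) (q : String × String) : PySem.Dict String String :=
  if d.contains q.1 then
    (if pvFreq cf q.2 > pvFreq cf (d.getD q.1 "") then d.insert q.1 q.2 else d)
  else d.insert q.1 q.2

theorem pvFoldA_filter (cf : List (String × Int)) (method : List Int) (ut uc : PySem.Set String)
    (l : List (String × String)) (t : PySem.Dict String String) :
    l.foldl (pvStepA cf method ut uc) t =
      (l.filter (pvElig method ut uc)).foldl (pvStepA' cf method) t := by
  rw [← PySem.List.foldl_if_eq_foldl_filter]
  apply PySem.List.foldl_congr_mem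
  intro acc x _
  unfold pvStepA pvStepA' pvElig
  cases hg : (PySem.Set.contains ut x.1 || PySem.Set.contains uc (pvNcode x.2 method)) <;>
    simp only [hg] <;> rfl

theorem pvFoldA_map (cf : List (String × Int)) (method : List Int)
    (l : List (String × String)) (t : PySem.Dict String String) :
    l.foldl (pvStepA' cf method) t =
      (l.map (fun p => (pvNcode p.2 method, p.1))).foldl (pvStepA2 cf) t := by
  rw [List.foldl_map]
  rfl

theorem pvShorten_eq_pvNcode : pvShorten = pvNcode := rfl

theorem pvCands_eq (mb : List (String × String)) (method : List Int)
    (ut uc : PySem.Set String) (utl ucl : List String)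
    (hut : ∀ x, PySem.Set.contains ut x = utl.contains x)
    (huc : ∀ x, PySem.Set.contains uc x = ucl.contains x) :
    pvCands mb method utl ucl
      = (mb.filter (pvElig method ut uc)).map (fun p => (pvNcode p.2 method, p.1)) := by
  unfold pvCands
  rw [List.filter_map, List.filter_filter]
  congr 1
  apply List.filter_congr
  intro p _
  simp only [Function.comp, pvElig, hut, huc, Bool.not_or, pvShorten_eq_pvNcode]
  exact Bool.and_comm _ _

theorem pvKeys_eq (cands : List (String × String)) :
    cands.foldl (fun ks q => if ks.contains q.1 then ks else ks ++ [q.1]) []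
      = PySem.Set.ofList (cands.map Prod.fst) := by
  rw [PySem.Set.ofList_eq_foldl, List.foldl_map]
  rfl

theorem pvBest_append (cf : List (String × Int)) (ts : List String) (x : String) (h : ts ≠ []) :
    pvBest cf (ts ++ [x])
      = (if pvFreq cf x > pvFreq cf (pvBest cf ts) then x else pvBest cf ts) := by
  cases ts with
  | nil => exact absurd rfl h
  | cons a t => simp [pvBest, List.foldl_append]

theorem pvContains_union (s : PySem.Set String) (l t : List String)
    (h : ∀ x, PySem.Set.contains s x = l.contains x) (x : String) :
    PySem.Set.contains (PySem.Set.union s t) x = (l ++ t).contains x := by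
  rw [Bool.eq_iff_iff, PySem.Set.contains_iff, List.contains_iff_mem,
    PySem.Set.mem_union, List.mem_append]
  have hx : x ∈ s ↔ x ∈ l := by
    rw [← PySem.Set.contains_iff, h, List.contains_iff_mem]
  tauto

theorem pvContains_ofList (v : List String) (x : String) :
    PySem.Set.contains (PySem.Set.ofList v) x = v.contains x := by
  rw [Bool.eq_iff_iff, PySem.Set.contains_iff, List.contains_iff_mem, PySem.Set.mem_ofList]

-- the per-method core: A's dict fold over the candidates, read off as items,
-- is B's first-occurrence keys mapped to their group winners
theorem pvTable_items (cf : List (String × Int)) (cands : List (String × String)) :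
    (cands.foldl (pvStepA2 cf) PySem.Dict.empty).items
      = (PySem.Set.ofList (cands.map Prod.fst)).map (fun nc =>
          (nc, pvBest cf ((cands.filter (fun q => q.1 == nc)).map Prod.snd))) := by
  induction cands using List.reverseRecOn with
  | nil => rfl
  | append_singleton l q ih =>
    rw [List.foldl_append]
    simp only [List.foldl_cons, List.foldl_nil]
    rw [List.map_append]
    simp only [List.map_cons, List.map_nil]
    rw [PySem.Set.ofList_append_singleton]
    set D := l.foldl (pvStepA2 cf) PySem.Dict.empty with hD
    have hkeys : D.keys = PySem.Set.ofList (l.map Prod.fst) := by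
      simp [PySem.Dict.keys, ih, List.map_map, Function.comp_def]
    have hnd : D.keys.Nodup := by rw [hkeys]; exact PySem.Set.nodup_ofList _
    by_cases hmem : q.1 ∈ PySem.Set.ofList (l.map Prod.fst)
    · -- existing key: A compares against the group's current winner
      have hcont : D.contains q.1 = true := by
        rw [PySem.Dict.contains_eq_decide_mem_keys, hkeys]
        simpa using hmem
      have hitem : (q.1, pvBest cf ((l.filter (fun r => r.1 == q.1)).map Prod.snd)) ∈ D.items := by
        rw [ih]
        exact List.mem_map_of_mem hmem
      have hgetD : D.getD q.1 "" = pvBest cf ((l.filter (fun r => r.1 == q.1)).map Prod.snd) :=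
        PySem.Dict.getD_of_mem_items _ hitem hnd ""
      have hgrp : (l.filter (fun r => r.1 == q.1)).map Prod.snd ≠ [] := by
        have hq : q.1 ∈ l.map Prod.fst := by
          rw [← PySem.Set.mem_ofList]; exact hmem
        obtain ⟨r, hrl, hr1⟩ := List.mem_map.mp hq
        have : r ∈ l.filter (fun r => r.1 == q.1) :=
          List.mem_filter.mpr ⟨hrl, by simp [hr1]⟩
        simp only [ne_eq, List.map_eq_nil_iff]
        exact List.ne_nil_of_mem this
      rw [PySem.Set.add_of_mem hmem]
      simp only [pvStepA2, hcont, if_true]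
      by_cases hgt : pvFreq cf q.2 > pvFreq cf (D.getD q.1 "")
      · rw [if_pos hgt]
        rw [PySem.Dict.items_insert, hcont, if_pos rfl, ih, List.map_map]
        apply List.map_congr_left
        intro nc hnc
        by_cases hq : nc = q.1
        · subst hq
          simp only [Function.comp, beq_self_eq_true, if_pos]
          have hfq : List.map Prod.snd (List.filter (fun r => r.1 == q.1) [q]) = [q.2] := by simp
          rw [List.filter_append, List.map_append, hfq, pvBest_append cf _ _ hgrp]
          rw [hgetD] at hgt
          simp [hgt]
        · have hne : (nc == q.1) = false := by simp [hq]
          simp only [Function.comp, hne, Bool.false_eq_true, if_false]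
          rw [List.filter_append]
          have : List.filter (fun r => r.1 == nc) [q] = [] := by
            simp [beq_iff_eq]
            intro h'; exact hq h'.symm
          rw [this, List.append_nil]
      · rw [if_neg hgt, ih]
        apply List.map_congr_left
        intro nc hnc
        by_cases hq : nc = q.1
        · subst hq
          have hfq : List.map Prod.snd (List.filter (fun r => r.1 == q.1) [q]) = [q.2] := by simp
          rw [List.filter_append, List.map_append, hfq, pvBest_append cf _ _ hgrp]
          rw [hgetD] at hgt
          simp [hgt]
        · rw [List.filter_append]
          have : List.filter (fun r => r.1 == nc) [q] = [] := by
            simp [beq_iff_eq]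
            intro h'; exact hq h'.symm
          rw [this, List.append_nil]
    · -- fresh key: both append a new entry
      have hcont : D.contains q.1 = false := by
        rw [PySem.Dict.contains_eq_decide_mem_keys, hkeys]
        simpa using hmem
      have hq1 : q.1 ∉ l.map Prod.fst := by
        rw [← PySem.Set.mem_ofList]; exact hmem
      have hfil : l.filter (fun r => r.1 == q.1) = [] := by
        rw [List.filter_eq_nil_iff]
        intro r hr
        simp only [beq_iff_eq]
        intro h'
        exact hq1 (h' ▸ List.mem_map_of_mem hr)
      simp only [pvStepA2, hcont, Bool.false_eq_true, if_false]
      rw [PySem.Dict.items_insert, hcont, ih]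
      simp only [Bool.false_eq_true, if_false]
      rw [PySem.Set.add_of_not_mem hmem, List.map_append]
      congr 1
      · apply List.map_congr_left
        intro nc hnc
        have hq : nc ≠ q.1 := fun h => hmem (h ▸ hnc)
        rw [List.filter_append]
        have : List.filter (fun r => r.1 == nc) [q] = [] := by
          simp [beq_iff_eq]
          intro h'; exact hq h'.symm
        rw [this, List.append_nil]
      · simp only [List.map_cons, List.map_nil]
        rw [List.filter_append, hfil, List.nil_append]
        simp [pvBest]

theorem pvOuter (mb : List (String × String)) (cf : List (String × Int)) :
    ∀ (methods : List (List Int)) (ut uc : PySem.Set String) (utl ucl : List String)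
      (acc : List (List (String × String))),
      (∀ x, PySem.Set.contains ut x = utl.contains x) →
      (∀ x, PySem.Set.contains uc x = ucl.contains x) →
      (methods.foldl (pvMethodA mb cf) (ut, uc, acc)).2.2
        = acc ++ pvBuild mb cf methods utl ucl := by
  intro methods
  induction methods with
  | nil => intro ut uc utl ucl acc _ _; simp [pvBuild]
  | cons m ms ih =>
    intro ut uc utl ucl acc h1 h2
    have hc := pvCands_eq mb m ut uc utl ucl h1 h2
    have hfold : mb.foldl (pvStepA cf m ut uc) PySem.Dict.empty
        = (pvCands mb m utl ucl).foldl (pvStepA2 cf) PySem.Dict.empty := by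
      rw [pvFoldA_filter, pvFoldA_map, hc]
    have hT : (mb.foldl (pvStepA cf m ut uc) PySem.Dict.empty).items
        = ((pvCands mb m utl ucl).foldl
            (fun ks q => if ks.contains q.1 then ks else ks ++ [q.1]) []).map (fun nc =>
          (nc, pvBest cf (((pvCands mb m utl ucl).filter (fun q => q.1 == nc)).map Prod.snd))) := by
      rw [hfold, pvTable_items, ← pvKeys_eq]
    rw [List.foldl_cons]
    show (ms.foldl (pvMethodA mb cf)
        (PySem.Set.union ut (mb.foldl (pvStepA cf m ut uc) PySem.Dict.empty).values,
         PySem.Set.union uc (mb.foldl (pvStepA cf m ut uc) PySem.Dict.empty).keys,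
         acc ++ [(mb.foldl (pvStepA cf m ut uc) PySem.Dict.empty).items])).2.2 = _
    set T := mb.foldl (pvStepA cf m ut uc) PySem.Dict.empty with hTdef
    set pairs := ((pvCands mb m utl ucl).foldl
        (fun ks q => if ks.contains q.1 then ks else ks ++ [q.1]) []).map (fun nc =>
      (nc, pvBest cf (((pvCands mb m utl ucl).filter (fun q => q.1 == nc)).map Prod.snd)))
      with hpairs
    have hvals : T.values = pairs.map Prod.snd := by
      simp only [PySem.Dict.values, hT]
    have hks : T.keys = pairs.map Prod.fst := by
      simp only [PySem.Dict.keys, hT]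
    rw [hvals, hks, ih _ _ _ _ _
      (fun x => pvContains_union ut utl (pairs.map Prod.snd) h1 x)
      (fun x => pvContains_union uc ucl (pairs.map Prod.fst) h2 x), hT]
    show (acc ++ [pairs]) ++ _ = acc ++ pvBuild mb cf (m :: ms) utl ucl
    simp only [pvBuild]
    rw [List.append_assoc]
    rfl

-- ===== VERDICT (by name: the statement is the Claim_ definition above) =====
theorem gen_jianma_spec : Claim_equal_gen_jianma := by
  intro mb methods char_freq _ _
  unfold Spec_gen_jianma gen_jianma gen_jianma_alt
  rw [pvOuter mb char_freq methods _ _ [] (mb.map Prod.snd) []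
    (fun _ => rfl) (fun x => pvContains_ofList (mb.map Prod.snd) x)]
  rfl
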